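-- pv_equiv track=rewrite | github.com/nikhilcusc/HRP-1 | UnNecCompliProblems/UNCP14.py | mergeStr
-- ===== SOURCE A (Python) =====
-- def mergeStr(a,b):
--     c = ''
--     counter=0
--     for i in range(len(a)):
--         if int(a[i]) or int(b[i]):
--             c+='1'
--             counter+=1
--         else:
--             c+='0'
--     return c, counter
-- ===== SOURCE B (Python) =====
-- def mergeStr(a, b):
--     # positions whose merged digit is 0: both digits there are zero
--     zero_pos = [i for i in range(len(a)) if int(a[i]) == 0 and int(b[i]) == 0]
--     bits = ['1'] * len(a)
--     for i in zero_pos: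
--         bits[i] = '0'
--     return ''.join(bits), len(a) - len(zero_pos)
-- ===== Notes on version B (the rewrite author's own statement) =====
-- stated objective: alternative
-- what changed: A's single forward loop threading a growing string and a running counter is replaced by a position-set decomposition: collect the indices where both digits are zero, punch '0' into a prefilled all-'1' list at those indices, and compute the counter arithmetically as len(a) minus the number of zero positions.
import Mathlib
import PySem

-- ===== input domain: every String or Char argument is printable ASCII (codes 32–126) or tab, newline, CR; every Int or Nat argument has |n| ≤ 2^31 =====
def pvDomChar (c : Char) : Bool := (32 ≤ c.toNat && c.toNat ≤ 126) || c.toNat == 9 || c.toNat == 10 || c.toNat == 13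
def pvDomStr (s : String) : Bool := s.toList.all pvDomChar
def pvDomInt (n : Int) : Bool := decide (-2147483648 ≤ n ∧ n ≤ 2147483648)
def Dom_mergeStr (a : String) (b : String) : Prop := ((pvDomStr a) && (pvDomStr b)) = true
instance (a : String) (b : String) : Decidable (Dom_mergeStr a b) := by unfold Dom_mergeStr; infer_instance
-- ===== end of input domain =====

-- B replaces A's single forward loop (growing string plus running counter) by a different
-- decomposition: collect the positions where both digits are zero, punch '0' into a prefilled
-- all-'1' list at those positions, and obtain the counter arithmetically as len - #zeros.

-- model of Python's `int(s[i])` on one character; the `.getD 0` defaults are never reached on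
-- Pre_ (which excludes the IndexError/ValueError inputs where both Pythons raise)
def pvIntAt (s : String) (i : Int) : Int :=
  ((PySem.Str.pyGet? s i).map (fun ch => (PySem.Int.ofChars? [ch]).getD 0)).getD 0

-- ===== PORT A =====
def mergeStr (a : String) (b : String) : String × Int :=
  -- c = ''; counter = 0; for i in range(len(a)): …  (c kept as a List Char accumulator)
  let r := (PySem.List.pyRange 0 (PySem.Str.len a) 1).foldl
    (fun (st : List Char × Int) i =>
      if pvIntAt a i ≠ 0 ∨ pvIntAt b i ≠ 0 then (st.1 ++ ['1'], st.2 + 1)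
      else (st.1 ++ ['0'], st.2))
    ([], 0)
  (String.ofList r.1, r.2)

-- ===== PORT B =====
def mergeStr_alt (a : String) (b : String) : String × Int :=
  -- zero_pos = [i for i in range(len(a)) if int(a[i]) == 0 and int(b[i]) == 0]
  let zeroPos := (PySem.List.pyRange 0 (PySem.Str.len a) 1).filter
    (fun i => pvIntAt a i = 0 ∧ pvIntAt b i = 0)
  -- bits = ['1'] * len(a)
  let bits : List Char := List.replicate a.toList.length '1'
  -- for i in zero_pos: bits[i] = '0'
  let bits := zeroPos.foldl (fun bs i => PySem.List.pySetD bs i '0') bits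
  -- return ''.join(bits), len(a) - len(zero_pos)
  (String.ofList bits, (a.toList.length : Int) - zeroPos.length)

-- ===== PRECONDITION & SPEC =====
-- Pre_ holds exactly where the Pythons return: every a[i] must be a digit (else int()
-- raises ValueError), and wherever a[i] is '0' the short-circuit reaches b[i], which
-- must exist (else IndexError) and be a digit.
def Pre_mergeStr (a : String) (b : String) : Prop :=
  ((List.range a.toList.length).all (fun i =>
    PySem.Chars.isdigit (a.toList.getD i ' ') &&
    (a.toList.getD i ' ' != '0' ||
      (decide (i < b.toList.length) && PySem.Chars.isdigit (b.toList.getD i ' '))))) = true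
instance (a : String) (b : String) : Decidable (Pre_mergeStr a b) := by
  unfold Pre_mergeStr; infer_instance
def pvWitness_mergeStr : String × String := ("105", "010")

def Spec_mergeStr (a : String) (b : String) (out : String × Int) : Prop := out = mergeStr_alt a b
instance (a : String) (b : String) (out : String × Int) : Decidable (Spec_mergeStr a b out) := by unfold Spec_mergeStr; infer_instance

-- ===== CLAIM (what is proved, stated in full; the proofs are below) =====
def Claim_equal_mergeStr : Prop := ∀ (a : String) (b : String), Dom_mergeStr a b → Pre_mergeStr a b → Spec_mergeStr a b (mergeStr a b)

-- ===== LEMMAS AND PROOFS =====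

-- A's state-threading loop, characterised as (map, count) over the index list
theorem pv_loop_eq (bit : Int → Char) (idxs : List Int)
    (hbit : ∀ i, bit i = '1' ∨ bit i = '0') (cs : List Char) (k : Int) :
    idxs.foldl
      (fun (st : List Char × Int) i =>
        if bit i = '1' then (st.1 ++ ['1'], st.2 + 1) else (st.1 ++ ['0'], st.2))
      (cs, k)
    = (cs ++ idxs.map bit, k + ((idxs.map bit).count '1' : Int)) := by
  induction idxs generalizing cs k with
  | nil => simp
  | cons i is ih =>
    simp only [List.foldl_cons, List.map_cons]
    by_cases hi : bit i = '1'
    · rw [if_pos hi, ih]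
      simp only [hi, List.count_cons, beq_self_eq_true, if_pos, List.append_assoc,
        List.cons_append, List.nil_append, Prod.mk.injEq, true_and]
      push_cast
      ring
    · rcases hbit i with h1 | h0
      · exact absurd h1 hi
      rw [if_neg hi, ih]
      simp [h0]

-- punching '0' at a list of in-range positions, read back element-wise
theorem pv_punch_getD (S : List Int) (bs : List Char)
    (hS : ∀ i ∈ S, 0 ≤ i ∧ i < (bs.length : Int)) (j : Nat) :
    (S.foldl (fun bs i => PySem.List.pySetD bs i '0') bs).getD j ' '
      = if (j : Int) ∈ S then '0' else bs.getD j ' ' := by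
  induction S generalizing bs with
  | nil => simp
  | cons i is ih =>
    obtain ⟨h0, hlt⟩ := hS i (List.mem_cons_self ..)
    have hset : PySem.List.pySetD bs i '0' = bs.set i.toNat '0' :=
      PySem.List.pySetD_of_nonneg bs '0' h0
    have hlen : (PySem.List.pySetD bs i '0').length = bs.length := by
      rw [hset]; simp
    rw [List.foldl_cons, ih _ (fun x hx => by rw [hlen]; exact hS x (List.mem_cons_of_mem _ hx))]
    by_cases hmem : (j : Int) ∈ is
    · simp [hmem]
    · simp only [hmem, if_false, List.mem_cons, or_false]
      by_cases hji : (j : Int) = i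
      · have hij : i.toNat = j := by omega
        rw [if_pos hji, hset, hij]
        simp [List.getD_eq_getElem?_getD, (show j < bs.length by omega)]
      · rw [if_neg hji, hset]
        have hne : i.toNat ≠ j := by omega
        simp [List.getD_eq_getElem?_getD, List.getElem?_set_ne hne]

-- the punch loop preserves the length
theorem pv_punch_length (S : List Int) (bs : List Char) :
    (S.foldl (fun bs i => PySem.List.pySetD bs i '0') bs).length = bs.length := by
  induction S generalizing bs with
  | nil => rfl
  | cons i is ih => rw [List.foldl_cons, ih]; exact PySem.List.length_pySetD ..

-- ===== VERDICT (by name: the statement is the Claim_ definition above) =====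
theorem mergeStr_spec : Claim_equal_mergeStr := by
  intro a b _ _
  unfold Spec_mergeStr mergeStr mergeStr_alt
  simp only [PySem.Str.len_eq]
  set n := a.toList.length with hn
  set R := PySem.List.pyRange 0 (n : Int) 1 with hR
  set bit : Int → Char :=
    fun i => if pvIntAt a i ≠ 0 ∨ pvIntAt b i ≠ 0 then '1' else '0' with hbitdef
  set g : Int → Char :=
    fun i => if pvIntAt a i = 0 ∧ pvIntAt b i = 0 then '0' else '1' with hgdef
  have hbit : ∀ i, bit i = '1' ∨ bit i = '0' := by
    intro i; by_cases h : pvIntAt a i ≠ 0 ∨ pvIntAt b i ≠ 0 <;> simp [hbitdef, h]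
  -- A's loop as (map, count)
  have hfold := pv_loop_eq bit R hbit [] 0
  simp only [show (fun (st : List Char × Int) i =>
      if pvIntAt a i ≠ 0 ∨ pvIntAt b i ≠ 0 then (st.1 ++ ['1'], st.2 + 1)
      else (st.1 ++ ['0'], st.2))
    = (fun (st : List Char × Int) i =>
      if bit i = '1' then (st.1 ++ ['1'], st.2 + 1) else (st.1 ++ ['0'], st.2)) by
      funext st i
      by_cases h : pvIntAt a i ≠ 0 ∨ pvIntAt b i ≠ 0 <;> simp [hbitdef, h]]
  rw [hfold]
  simp only [List.nil_append, zero_add]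
  -- A's bit and B's zero-test are propositional complements, so the bit maps agree
  have hmap : R.map bit = R.map g := by
    apply List.map_congr_left
    intro i _
    by_cases hp : pvIntAt a i = 0 ∧ pvIntAt b i = 0
    · simp [hbitdef, hgdef, hp.1, hp.2]
    · have : pvIntAt a i ≠ 0 ∨ pvIntAt b i ≠ 0 := by tauto
      simp [hbitdef, hgdef, this, hp]
  rw [hmap]
  -- B's punched list is the mapped list
  set Z := R.filter (fun i => decide (pvIntAt a i = 0 ∧ pvIntAt b i = 0)) with hZ
  have hZmem : ∀ i ∈ Z, 0 ≤ i ∧ i < ((List.replicate n '1').length : Int) := by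
    intro i hi
    have := List.mem_of_mem_filter hi
    rw [hR, PySem.List.mem_pyRange_one] at this
    simpa using this
  have hlenR : (R.map g).length = n := by
    simp [hR, PySem.List.length_pyRange_one]
  have hlenB : (Z.foldl (fun bs i => PySem.List.pySetD bs i '0') (List.replicate n '1')).length = n := by
    rw [pv_punch_length]; simp
  have hbits : Z.foldl (fun bs i => PySem.List.pySetD bs i '0') (List.replicate n '1') = R.map g := by
    apply List.ext_getElem (by rw [hlenB, hlenR])
    intro j hj1 hj2
    have hjn : j < n := by rwa [hlenB] at hj1
    have hL : (Z.foldl (fun bs i => PySem.List.pySetD bs i '0') (List.replicate n '1'))[j]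
        = (Z.foldl (fun bs i => PySem.List.pySetD bs i '0') (List.replicate n '1')).getD j ' ' :=
      (List.getD_eq_getElem _ ' ' hj1).symm
    have hjR : ((j : Int)) ∈ R := by
      rw [hR, PySem.List.mem_pyRange_one]; constructor <;> omega
    have hmemZ : ((j : Int) ∈ Z) ↔ (pvIntAt a (j : Int) = 0 ∧ pvIntAt b (j : Int) = 0) := by
      rw [hZ]; simp [List.mem_filter, hjR]
    have hRj : (R.map g).getD j ' ' = g ((j : Int)) := by
      rw [← PySem.List.pyGetD_natCast, hR]
      exact PySem.List.pyGetD_map_pyRange g n j ' ' hjn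
    rw [hL, pv_punch_getD Z _ hZmem j,
      show (R.map g)[j] = (R.map g).getD j ' ' from (List.getD_eq_getElem _ ' ' hj2).symm,
      hRj]
    simp only [hgdef]
    by_cases hp : pvIntAt a (j : Int) = 0 ∧ pvIntAt b (j : Int) = 0
    · rw [if_pos (hmemZ.mpr hp), if_pos hp]
    · rw [if_neg (fun h => hp (hmemZ.mp h)), if_neg hp,
        List.getD_eq_getElem _ _ (by simpa using hjn), List.getElem_replicate]
  -- the counter: count of '1' in the mapped list is n - #zero positions
  have hcount : ((R.map g).count '1' : Int) = (n : Int) - (Z.length : Int) := by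
    have h1 : (R.map g).count '1' = R.countP (fun i => g i == '1') := by
      simp [List.count, List.countP_map, Function.comp_def]
    have h3 : Z.length = R.countP (fun i => decide (pvIntAt a i = 0 ∧ pvIntAt b i = 0)) := by
      rw [hZ, List.countP_eq_length_filter]
    have h4 := List.length_eq_countP_add_countP (l := R)
      (p := fun i => decide (pvIntAt a i = 0 ∧ pvIntAt b i = 0))
    simp only [decide_eq_true_eq, decide_not] at h4
    have h5 : R.length = n := by simp [hR, PySem.List.length_pyRange_one]
    have h6 : R.countP (fun i => g i == '1')
        = R.countP (fun i => !(decide (pvIntAt a i = 0 ∧ pvIntAt b i = 0))) := by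
      apply List.countP_congr
      intro i _
      simp only [hgdef]
      by_cases hp : pvIntAt a i = 0 ∧ pvIntAt b i = 0
      · rw [if_pos hp, decide_eq_true hp]; rfl
      · rw [if_neg hp, decide_eq_false hp]; rfl
    omega
  rw [hbits, hcount]
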